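-- pv_equiv track=rewrite | github.com/danielrobapaz/Diseno_algoritmos | arreglos_buenos.py | subarreglos_buenos
-- ===== SOURCE A (Python) =====
-- def subarreglos_buenos(A: list[int]) -> int:
--     _A  = [0] + A
--     N = len(A)
--     prev = [0] + ([1] * N)
--     res = N
--
--     for j in range(2, N+1):
--         curr = [0] * (N+1)
--         for i in range(j, N+1):
--             if _A[i] % j == 0:
--                 curr[i] = sum(prev[:i])
--         prev = curr[:]
--         res += sum(curr)
--
--     return res
-- ===== SOURCE B (Python) =====
-- def subarreglos_buenos(A: list[int]) -> int:
--     # Single left-to-right pass with an in-place length-indexed DP: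
--     # dp[j] = number of index subsequences i1<...<ij seen so far with
--     # A[ik] divisible by k for k>=2.  Updating j descending uses dp[j-1]
--     # from strictly earlier elements, so one pass replaces A's N staged rows.
--     N = len(A)
--     dp = [0] * (N + 1)
--     for i, x in enumerate(A, start=1):
--         for j in range(i, 1, -1):
--             if x % j == 0:
--                 dp[j] += dp[j - 1]
--         dp[1] += 1
--     return sum(dp)
-- ===== Notes on version B (the rewrite author's own statement) =====
-- stated objective: faster
-- what changed: B transposes the loop order: one left-to-right pass over the elements with a single in-place length-indexed DP array updated for j descending (the classic subsequence-count DP), instead of A's N staged per-length rows each recomputing sum(prev[:i]) slice-sums; O(N^3) becomes O(N^2).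
import Mathlib
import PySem

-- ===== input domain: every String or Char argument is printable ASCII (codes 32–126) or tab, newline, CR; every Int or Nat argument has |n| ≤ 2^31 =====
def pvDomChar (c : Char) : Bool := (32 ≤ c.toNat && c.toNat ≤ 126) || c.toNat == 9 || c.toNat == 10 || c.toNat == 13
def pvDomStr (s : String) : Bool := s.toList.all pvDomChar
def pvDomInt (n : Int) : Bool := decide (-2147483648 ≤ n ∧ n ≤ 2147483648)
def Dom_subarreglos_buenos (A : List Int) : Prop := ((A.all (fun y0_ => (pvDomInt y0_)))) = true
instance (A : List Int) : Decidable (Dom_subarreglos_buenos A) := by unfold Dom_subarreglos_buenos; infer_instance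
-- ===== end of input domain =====

-- B transposes the loop order: a single left-to-right pass with one in-place
-- length-indexed DP array (updated descending), instead of A's N staged
-- per-length rows with sum(prev[:i]) slice-sums — O(N^2) instead of O(N^3).

-- ===== PORT A =====
-- inner-loop body of A: 'if _A[i] % j == 0: curr[i] = sum(prev[:i])'
def stepA (NA prev : List Int) (j : Int) (c : List Int) (i : Int) : List Int :=
  if PySem.Int.mod (PySem.List.pyGetD NA i 0) j = 0 then
    PySem.List.pySetD c i ((PySem.List.slice prev none (some i)).sum)
  else c

-- outer-loop body of A over state (res, prev)
def outerA (NA : List Int) (N : Nat) (st : Int × List Int) (j : Int) : Int × List Int :=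
  let curr := (PySem.List.pyRange j ((N : Int) + 1) 1).foldl (stepA NA st.2 j)
      (List.replicate (N + 1) 0)
  (st.1 + curr.sum, curr)

def subarreglos_buenos (A : List Int) : Int :=
  let NA : List Int := 0 :: A      -- _A = [0] + A
  let N : Nat := A.length
  ((PySem.List.pyRange 2 ((N : Int) + 1) 1).foldl (outerA NA N)
      ((N : Int), 0 :: List.replicate N 1)).1

-- ===== PORT B =====
-- inner-loop body of B: 'if x % j == 0: dp[j] += dp[j-1]'
def stepB (x : Int) (dp : List Int) (j : Int) : List Int :=
  if PySem.Int.mod x j = 0 then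
    PySem.List.pySetD dp j (PySem.List.pyGetD dp j 0 + PySem.List.pyGetD dp (j - 1) 0)
  else dp

-- body of B's single pass, one element (i, x) of enumerate(A, start=1)
def elemB (dp : List Int) (p : Int × Int) : List Int :=
  let dp2 := (PySem.List.pyRange p.1 1 (-1)).foldl (stepB p.2) dp
  PySem.List.pySetD dp2 1 (PySem.List.pyGetD dp2 1 0 + 1)

def subarreglos_buenos_alt (A : List Int) : Int :=
  ((PySem.List.enumerate A 1).foldl elemB (List.replicate (A.length + 1) 0)).sum

-- ===== PRECONDITION & SPEC =====
def Spec_subarreglos_buenos (A : List Int) (out : Int) : Prop := out = subarreglos_buenos_alt A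
instance (A : List Int) (out : Int) : Decidable (Spec_subarreglos_buenos A out) := by unfold Spec_subarreglos_buenos; infer_instance

-- ===== CLAIM (what is proved, stated in full; the proofs are below) =====
def Claim_equal_subarreglos_buenos : Prop := ∀ (A : List Int), Dom_subarreglos_buenos A → Spec_subarreglos_buenos A (subarreglos_buenos A)

-- ===== LEMMAS AND PROOFS =====

-- the common mathematical table: rowSpec A j = A's row for subsequence length j
def rowSpec (A : List Int) : Nat → List Int
  | 0 => List.replicate (A.length + 1) 0
  | 1 => 0 :: List.replicate A.length 1
  | (j + 2) => (List.range (A.length + 1)).map (fun i =>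
      if j + 2 ≤ i ∧ PySem.Int.mod ((0 :: A).getD i 0) ((j : Int) + 2) = 0
      then ((rowSpec A (j + 1)).take i).sum else 0)

-- A's running res after rows 2 .. m+1 have been added
def resSpec (A : List Int) : Nat → Int
  | 0 => (A.length : Int)
  | (m + 1) => resSpec A m + (rowSpec A (m + 2)).sum

-- B's dp array after the first m elements have been processed
def dpSpec (A : List Int) (m : Nat) : List Int :=
  (List.range (A.length + 1)).map (fun j => ((rowSpec A j).take (m + 1)).sum)

theorem length_rowSpec (A : List Int) (j : Nat) : (rowSpec A j).length = A.length + 1 := by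
  match j with
  | 0 => simp [rowSpec]
  | 1 => simp [rowSpec]
  | (j + 2) => simp [rowSpec]

theorem length_dpSpec (A : List Int) (m : Nat) : (dpSpec A m).length = A.length + 1 := by
  simp [dpSpec]

-- sum of a take grows by one entry
theorem sum_take_succ :
    ∀ (l : List Int) (n : Nat), n < l.length →
      (l.take (n + 1)).sum = (l.take n).sum + l.getD n 0 := by
  intro l
  induction l with
  | nil => intro n h; simp at h
  | cons x l ih =>
      intro n h
      cases n with
      | zero => simp [List.getD]
      | succ n =>
          simp only [List.take_succ_cons, List.sum_cons]
          rw [ih n (by simpa using h)]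
          simp [List.getD]
          ring

theorem getD_dpSpec (A : List Int) (m j : Nat) (hj : j ≤ A.length) :
    (dpSpec A m).getD j 0 = ((rowSpec A j).take (m + 1)).sum := by
  simp [dpSpec, List.getD, Nat.lt_succ_of_le hj]

-- entries of rowSpec for j ≥ 2, in-range index
theorem getD_rowSpec (A : List Int) (j i : Nat) (hi : i ≤ A.length) :
    (rowSpec A (j + 2)).getD i 0 =
      if j + 2 ≤ i ∧ PySem.Int.mod ((0 :: A).getD i 0) ((j : Int) + 2) = 0
      then ((rowSpec A (j + 1)).take i).sum else 0 := by
  simp [rowSpec, List.getD, Nat.lt_succ_of_le hi]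

theorem getD_rowSpec_one (A : List Int) (i : Nat) :
    (rowSpec A 1).getD i 0 = if 1 ≤ i ∧ i ≤ A.length then 1 else 0 := by
  match i with
  | 0 => simp [rowSpec]
  | (i + 1) =>
      by_cases h : i < A.length
      · simp [rowSpec, List.getD, h]
      · rw [List.getD_eq_default _ _ (by simp [rowSpec]; omega)]
        simp; omega

-- ---------- A side ----------

theorem length_foldA (NA prev : List Int) (j : Int) :
    ∀ (L : List Int) (c : List Int),
      (L.foldl (stepA NA prev j) c).length = c.length := by
  intro L
  induction L with
  | nil => intro c; rfl
  | cons i L ih =>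
      intro c
      simp only [List.foldl_cons, ih]
      unfold stepA
      split
      · exact PySem.List.length_pySetD _ _ _
      · rfl

-- pointwise description of A's inner fold from the zero row
theorem foldA_getD (A prev : List Int) (jI : Int) (hj : 0 ≤ jI) :
    ∀ (mn : Nat) (i : Nat),
      ((PySem.List.pyRange jI (jI + mn) 1).foldl (stepA (0 :: A) prev jI)
          (List.replicate (A.length + 1) 0)).getD i 0
      = if jI ≤ (i : Int) ∧ (i : Int) < jI + mn ∧ i ≤ A.length ∧
            PySem.Int.mod ((0 :: A).getD i 0) jI = 0
        then (prev.take i).sum else 0 := by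
  intro mn
  induction mn with
  | zero =>
      intro i
      rw [show jI + (0 : Nat) = jI by simp, PySem.List.pyRange_one_eq_nil (le_refl jI)]
      simp only [List.foldl_nil]
      rw [if_neg (by omega)]
      simp [List.getD, List.getElem?_getD_replicate_default_eq]
  | succ mn ih =>
      intro i
      rw [show jI + ((mn + 1 : Nat) : Int) = (jI + mn) + 1 by push_cast; ring,
          PySem.List.pyRange_one_succ_right (by omega), List.foldl_append]
      simp only [List.foldl_cons, List.foldl_nil]
      -- the new index is e = jI + mn, a nonnegative Int
      set c := (PySem.List.pyRange jI (jI + mn) 1).foldl (stepA (0 :: A) prev jI)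
          (List.replicate (A.length + 1) 0) with hc
      have hclen : c.length = A.length + 1 := by rw [hc, length_foldA]; simp
      have he : (0 : Int) ≤ jI + mn := by omega
      have hgetNA : PySem.List.pyGetD (0 :: A) (jI + mn) 0 = (0 :: A).getD (jI + mn).toNat 0 :=
        PySem.List.pyGetD_of_nonneg _ _ he
      unfold stepA
      by_cases hdiv : PySem.Int.mod ((0 :: A).getD (jI + mn).toNat 0) jI = 0
      · rw [if_pos (by rw [hgetNA]; exact hdiv),
            PySem.List.slice_to prev he, PySem.List.pySetD_of_nonneg _ _ he]
        by_cases hie : (i : Int) = jI + mn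
        · have hin : (jI + mn).toNat = i := by omega
          rw [hin] at hdiv ⊢
          by_cases hiN : i ≤ A.length
          · rw [List.getD, List.getElem?_set_self (by omega), Option.getD_some,
                if_pos (by refine ⟨by omega, by omega, hiN, hdiv⟩)]
          · rw [List.set_eq_of_length_le (by omega), ih i, if_neg (by omega),
                if_neg (by omega)]
        · rw [List.getD, List.getElem?_set_ne (by omega), ← List.getD, ih i]
          by_cases h1 : jI ≤ (i : Int) ∧ (i : Int) < jI + mn ∧ i ≤ A.length ∧
              PySem.Int.mod ((0 :: A).getD i 0) jI = 0
          · rw [if_pos h1, if_pos ⟨h1.1, by omega, h1.2.2⟩]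
          · rw [if_neg h1, if_neg (by intro h2; exact h1 ⟨h2.1, by omega, h2.2.2⟩)]
      · rw [if_neg (by rw [hgetNA]; exact hdiv), ih i]
        by_cases hie : (i : Int) = jI + mn
        · have hin : (jI + mn).toNat = i := by omega
          rw [hin] at hdiv
          rw [if_neg (by omega), if_neg (by intro h2; exact hdiv h2.2.2.2)]
        · by_cases h1 : jI ≤ (i : Int) ∧ (i : Int) < jI + mn ∧ i ≤ A.length ∧
              PySem.Int.mod ((0 :: A).getD i 0) jI = 0
          · rw [if_pos h1, if_pos ⟨h1.1, by omega, h1.2.2⟩]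
          · rw [if_neg h1, if_neg (by intro h2; exact h1 ⟨h2.1, by omega, h2.2.2⟩)]

-- A's inner loop builds exactly row j+2 of the table
theorem foldA_eq_rowSpec (A prev : List Int) (j : Nat) (hprev : prev = rowSpec A (j + 1)) :
    (PySem.List.pyRange ((j : Int) + 2) ((A.length : Int) + 1) 1).foldl
        (stepA (0 :: A) prev ((j : Int) + 2)) (List.replicate (A.length + 1) 0)
      = rowSpec A (j + 2) := by
  apply List.ext_getElem
  · rw [length_foldA]; simp [length_rowSpec]
  · intro i hi1 hi2
    have hiN : i ≤ A.length := by
      have := hi2; rw [length_rowSpec] at this; omega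
    rw [← List.getD_eq_getElem _ 0 hi1, ← List.getD_eq_getElem _ 0 hi2,
        getD_rowSpec A j i hiN]
    by_cases hb : (j : Int) + 2 ≤ (A.length : Int) + 1
    · rw [show (A.length : Int) + 1 = ((j : Int) + 2) + (((A.length + 1) - (j + 2) : Nat) : Int)
            by push_cast; omega,
          foldA_getD A prev ((j : Int) + 2) (by omega), hprev]
      by_cases h1 : j + 2 ≤ i ∧ PySem.Int.mod ((0 :: A).getD i 0) ((j : Int) + 2) = 0
      · rw [if_pos h1, if_pos (by push_cast; refine ⟨by omega, by omega, hiN, h1.2⟩)]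
      · rw [if_neg h1, if_neg (by push_cast; intro h2; exact h1 ⟨by omega, h2.2.2.2⟩)]
    · rw [PySem.List.pyRange_one_eq_nil (by omega)]
      simp only [List.foldl_nil]
      rw [if_neg (by omega)]
      simp [List.getD, List.getElem?_getD_replicate_default_eq]

-- A's outer loop: after rows 2 .. m+1, state = (resSpec m, rowSpec (m+1))
theorem outerA_inv (A : List Int) :
    ∀ (m : Nat),
      (PySem.List.pyRange 2 ((m : Int) + 2) 1).foldl (outerA (0 :: A) A.length)
          ((A.length : Int), rowSpec A 1)
        = (resSpec A m, rowSpec A (m + 1)) := by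
  intro m
  induction m with
  | zero =>
      rw [show ((0 : Nat) : Int) + 2 = 2 by norm_num,
          PySem.List.pyRange_one_eq_nil (le_refl 2)]
      rfl
  | succ m ih =>
      rw [show ((m + 1 : Nat) : Int) + 2 = ((m : Int) + 2) + 1 by push_cast; ring,
          PySem.List.pyRange_one_succ_right (by omega), List.foldl_append, ih]
      simp only [List.foldl_cons, List.foldl_nil]
      unfold outerA
      simp only
      rw [show (m : Int) + 2 = ((m : Int)) + 2 by ring,
          foldA_eq_rowSpec A (rowSpec A (m + 1)) m rfl]
      rfl

-- ---------- B side ----------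

theorem length_foldB (x : Int) :
    ∀ (L : List Int) (dp : List Int), (L.foldl (stepB x) dp).length = dp.length := by
  intro L
  induction L with
  | nil => intro dp; rfl
  | cons j L ih =>
      intro dp
      simp only [List.foldl_cons, ih]
      unfold stepB
      split
      · exact PySem.List.length_pySetD _ _ _
      · rfl

-- pointwise description of B's descending inner loop
theorem foldB_getD (x : Int) :
    ∀ (k : Nat) (dp : List Int), k < dp.length → ∀ (j : Nat),
      ((PySem.List.pyRange (k : Int) 1 (-1)).foldl (stepB x) dp).getD j 0
      = if 2 ≤ j ∧ j ≤ k ∧ PySem.Int.mod x (j : Int) = 0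
        then dp.getD j 0 + dp.getD (j - 1) 0 else dp.getD j 0 := by
  intro k
  induction k with
  | zero =>
      intro dp _ j
      rw [PySem.List.pyRange_neg_one_eq_nil (by omega)]
      simp only [List.foldl_nil]
      rw [if_neg (by omega)]
  | succ k ih =>
      intro dp hlen j
      by_cases hk : k = 0
      · subst hk
        rw [PySem.List.pyRange_neg_one_eq_nil (by omega)]
        simp only [List.foldl_nil]
        rw [if_neg (by omega)]
      · rw [PySem.List.pyRange_neg_one_cons (by omega : (1 : Int) < ((k + 1 : Nat) : Int))]
        simp only [List.foldl_cons]
        set dp1 := stepB x dp ((k + 1 : Nat) : Int) with hdp1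
        have hlen1 : dp1.length = dp.length := by
          rw [hdp1]; unfold stepB; split
          · exact PySem.List.length_pySetD _ _ _
          · rfl
        have hd1 : ∀ (n : Nat),
            dp1.getD n 0 = if n = k + 1 ∧ PySem.Int.mod x ((k + 1 : Nat) : Int) = 0
              then dp.getD (k + 1) 0 + dp.getD k 0 else dp.getD n 0 := by
          intro n
          rw [hdp1]; unfold stepB
          by_cases hdiv : PySem.Int.mod x ((k + 1 : Nat) : Int) = 0
          · rw [if_pos hdiv, PySem.List.pySetD_natCast,
                show ((k + 1 : Nat) : Int) - 1 = ((k : Nat) : Int) by push_cast; ring,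
                PySem.List.pyGetD_natCast, PySem.List.pyGetD_natCast]
            by_cases hn : n = k + 1
            · subst hn
              rw [List.getD, List.getElem?_set_self (by omega), Option.getD_some,
                  if_pos ⟨rfl, hdiv⟩]
            · rw [List.getD, List.getElem?_set_ne (by omega), ← List.getD,
                  if_neg (by intro h; exact hn h.1)]
          · rw [if_neg hdiv, if_neg (by intro h; exact hdiv h.2)]
        rw [show ((k + 1 : Nat) : Int) - 1 = ((k : Nat) : Int) by push_cast; ring,
            ih dp1 (by omega) j, hd1 j]
        by_cases hj : 2 ≤ j ∧ j ≤ k ∧ PySem.Int.mod x (j : Int) = 0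
        · rw [if_pos hj, hd1 (j - 1),
              if_neg (by intro h; omega), if_neg (by intro h; omega),
              if_pos ⟨hj.1, by omega, hj.2.2⟩]
        · rw [if_neg hj]
          by_cases hj1 : j = k + 1 ∧ PySem.Int.mod x ((k + 1 : Nat) : Int) = 0
          · rw [if_pos hj1, if_pos (by
              obtain ⟨h1, h2⟩ := hj1
              subst h1
              exact ⟨by omega, le_refl _, h2⟩)]
            congr 1
            · congr 1; omega
            · congr 1; omega
          · rw [if_neg hj1, if_neg (by
              intro h
              obtain ⟨h1, h2, h3⟩ := h
              have : j = k + 1 := by omega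
              subst this
              exact hj1 ⟨rfl, h3⟩)]

-- one element of B's pass advances dpSpec by one
theorem elemB_step (A : List Int) (m : Nat) (hm : m < A.length) :
    elemB (dpSpec A m) (((m : Int)) + 1, (0 :: A).getD (m + 1) 0) = dpSpec A (m + 1) := by
  unfold elemB
  simp only
  set x := (0 :: A).getD (m + 1) 0 with hx
  have hcast : (m : Int) + 1 = ((m + 1 : Nat) : Int) := by push_cast; ring
  rw [hcast]
  set dp2 := (PySem.List.pyRange ((m + 1 : Nat) : Int) 1 (-1)).foldl (stepB x) (dpSpec A m)
    with hdp2
  have hlen2 : dp2.length = A.length + 1 := by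
    rw [hdp2, length_foldB, length_dpSpec]
  have hd2 : ∀ (j : Nat), dp2.getD j 0
      = if 2 ≤ j ∧ j ≤ m + 1 ∧ PySem.Int.mod x (j : Int) = 0
        then (dpSpec A m).getD j 0 + (dpSpec A m).getD (j - 1) 0
        else (dpSpec A m).getD j 0 := by
    intro j
    rw [hdp2, foldB_getD x (m + 1) (dpSpec A m) (by rw [length_dpSpec]; omega) j]
  apply List.ext_getElem
  · rw [PySem.List.length_pySetD, hlen2, length_dpSpec]
  · intro j hj1 hj2
    have hjN : j ≤ A.length := by
      have := hj2; rw [length_dpSpec] at this; omega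
    rw [← List.getD_eq_getElem _ 0 hj1, ← List.getD_eq_getElem _ 0 hj2,
        getD_dpSpec A (m + 1) j hjN]
    have hone : (PySem.List.pySetD dp2 1 (PySem.List.pyGetD dp2 1 0 + 1)).getD j 0
        = if j = 1 then dp2.getD 1 0 + 1 else dp2.getD j 0 := by
      rw [show (1 : Int) = ((1 : Nat) : Int) by norm_num,
          PySem.List.pySetD_natCast, PySem.List.pyGetD_natCast]
      by_cases hj : j = 1
      · subst hj
        rw [List.getD, List.getElem?_set_self (by omega), Option.getD_some, if_pos rfl]
      · rw [List.getD, List.getElem?_set_ne (by omega), ← List.getD, if_neg hj]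
    rw [hone]
    have hsucc : ((rowSpec A j).take (m + 1 + 1)).sum
        = ((rowSpec A j).take (m + 1)).sum + (rowSpec A j).getD (m + 1) 0 :=
      sum_take_succ _ _ (by rw [length_rowSpec]; omega)
    match j with
    | 0 =>
        rw [if_neg (by omega), hd2 0, if_neg (by omega),
            getD_dpSpec A m 0 (by omega), hsucc]
        have h00 : (rowSpec A 0).getD (m + 1) 0 = 0 := by
          simp [rowSpec, List.getD, List.getElem?_getD_replicate_default_eq]
        rw [h00, add_zero]
    | 1 =>
        rw [if_pos rfl, hd2 1, if_neg (by omega), getD_dpSpec A m 1 (by omega), hsucc,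
            getD_rowSpec_one A (m + 1), if_pos ⟨by omega, by omega⟩]
    | (j + 2) =>
        rw [if_neg (by omega), hd2 (j + 2), hsucc,
            getD_rowSpec A j (m + 1) (by omega), getD_dpSpec A m (j + 2) hjN]
        by_cases hcond : j + 2 ≤ m + 1 ∧ PySem.Int.mod x ((j : Int) + 2) = 0
        · rw [if_pos (by
              refine ⟨by omega, hcond.1, ?_⟩
              rw [show ((j + 2 : Nat) : Int) = (j : Int) + 2 by push_cast; ring]
              exact hcond.2),
            if_pos (by exact ⟨hcond.1, hcond.2⟩),
            show j + 2 - 1 = j + 1 from rfl,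
            getD_dpSpec A m (j + 1) (by omega)]
        · rw [if_neg (by
              intro h
              refine hcond ⟨h.2.1, ?_⟩
              rw [show (j : Int) + 2 = ((j + 2 : Nat) : Int) by push_cast; ring]
              exact h.2.2),
            if_neg (by intro h; exact hcond ⟨h.1, h.2⟩), add_zero]

-- B's whole pass, from element m on
theorem foldB_outer (A : List Int) :
    ∀ (k m : Nat), m + k = A.length →
      (PySem.List.enumerate (A.drop m) ((m : Int) + 1)).foldl elemB (dpSpec A m)
        = dpSpec A A.length := by
  intro k
  induction k with
  | zero =>
      intro m hm
      rw [show m = A.length by omega, List.drop_length, PySem.List.enumerate_nil,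
          List.foldl_nil]
  | succ k ih =>
      intro m hm
      have hmlt : m < A.length := by omega
      rw [List.drop_eq_getElem_cons hmlt, PySem.List.enumerate_cons, List.foldl_cons]
      have hval : A[m] = (0 :: A).getD (m + 1) 0 := by
        rw [List.getD, List.getElem?_cons_succ, List.getElem?_eq_getElem hmlt,
            Option.getD_some]
      rw [hval, elemB_step A m hmlt,
          show (m : Int) + 1 + 1 = ((m + 1 : Nat) : Int) + 1 by push_cast; ring]
      exact ih (m + 1) (by omega)

-- ---------- putting the two sides together ----------

theorem dpSpec_zero (A : List Int) : dpSpec A 0 = List.replicate (A.length + 1) 0 := by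
  apply List.ext_getElem
  · simp [length_dpSpec]
  · intro j hj1 hj2
    have hjN : j ≤ A.length := by
      have := hj1; rw [length_dpSpec] at this; omega
    simp only [List.getElem_replicate]
    rw [← List.getD_eq_getElem _ 0 hj1, getD_dpSpec A 0 j hjN]
    match j with
    | 0 => simp [rowSpec]
    | 1 => simp [rowSpec]
    | (j + 2) =>
        rw [show (1 : Nat) = 0 + 1 by rfl,
            sum_take_succ _ 0 (by rw [length_rowSpec]; omega)]
        simp only [List.take_zero, List.sum_nil, zero_add]
        rw [getD_rowSpec A j 0 (by omega), if_neg (by omega)]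

-- sum of all rows 0 .. m+1 equals A's running res
theorem sum_rows (A : List Int) :
    ∀ (m : Nat), (((List.range (m + 2)).map (fun j => (rowSpec A j).sum)).sum : Int)
      = resSpec A m := by
  intro m
  induction m with
  | zero =>
      show (((List.range 2).map (fun j => (rowSpec A j).sum)).sum : Int) = (A.length : Int)
      rw [show List.range 2 = [0, 1] by rfl]
      simp [rowSpec]
  | succ m ih =>
      rw [show m + 1 + 2 = (m + 2) + 1 by ring, List.range_succ, List.map_append,
          List.sum_append, ih]
      simp [resSpec]

theorem dpSpec_sum (A : List Int) :
    (dpSpec A A.length).sum = ((List.range (A.length + 1)).map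
      (fun j => (rowSpec A j).sum)).sum := by
  unfold dpSpec
  congr 1
  apply List.map_congr_left
  intro j _
  rw [List.take_of_length_le (by rw [length_rowSpec])]

-- ===== VERDICT (by name: the statement is the Claim_ definition above) =====
theorem subarreglos_buenos_spec : Claim_equal_subarreglos_buenos := by
  intro A _
  unfold Spec_subarreglos_buenos subarreglos_buenos subarreglos_buenos_alt
  simp only
  by_cases h0 : A.length = 0
  · have hA : A = [] := List.eq_nil_of_length_eq_zero h0
    subst hA
    decide
  · obtain ⟨n, hN⟩ : ∃ n, A.length = n + 1 := ⟨A.length - 1, by omega⟩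
    have hrow1 : (0 : Int) :: List.replicate A.length 1 = rowSpec A 1 := rfl
    have hAres := outerA_inv A n
    rw [show (n : Int) + 2 = (A.length : Int) + 1 by rw [hN]; push_cast; ring] at hAres
    rw [hrow1, hAres]
    have hB := foldB_outer A A.length 0 (by omega)
    rw [List.drop_zero, show ((0 : Nat) : Int) + 1 = 1 by norm_num, dpSpec_zero] at hB
    rw [hB, dpSpec_sum, show A.length + 1 = n + 2 by omega, sum_rows A n]
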